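-- pv_equiv track=rewrite | github.com/isaac-sim/orbit | source/standalone/workflows/ray/grok_cluster_with_kubectl.py | check_clusters_running
-- ===== SOURCE A (Python) =====
-- def check_clusters_running(pods, clusters):
--     clusters_running = True
--     for cluster in clusters:
--         cluster_pods = [p for p in pods if p[0].startswith(cluster)]
--         total_pods = len(cluster_pods)
--         running_pods = len([p for p in cluster_pods if p[1] == 'Running'])
--         if running_pods != total_pods:
--             clusters_running = False
--             break
--     return clusters_running
-- ===== SOURCE B (Python) =====
-- def check_clusters_running(pods, clusters):
--     bad = [name for name, status in pods if status != 'Running']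
--     return not any(name.startswith(cluster) for cluster in clusters for name in bad)
-- ===== Notes on version B (the rewrite author's own statement) =====
-- stated objective: simpler
-- what changed: Instead of building and counting per-cluster pod lists in a loop with a break flag, B filters the non-Running pod names once and returns whether no cluster name is a prefix of any of them.
import Mathlib
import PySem

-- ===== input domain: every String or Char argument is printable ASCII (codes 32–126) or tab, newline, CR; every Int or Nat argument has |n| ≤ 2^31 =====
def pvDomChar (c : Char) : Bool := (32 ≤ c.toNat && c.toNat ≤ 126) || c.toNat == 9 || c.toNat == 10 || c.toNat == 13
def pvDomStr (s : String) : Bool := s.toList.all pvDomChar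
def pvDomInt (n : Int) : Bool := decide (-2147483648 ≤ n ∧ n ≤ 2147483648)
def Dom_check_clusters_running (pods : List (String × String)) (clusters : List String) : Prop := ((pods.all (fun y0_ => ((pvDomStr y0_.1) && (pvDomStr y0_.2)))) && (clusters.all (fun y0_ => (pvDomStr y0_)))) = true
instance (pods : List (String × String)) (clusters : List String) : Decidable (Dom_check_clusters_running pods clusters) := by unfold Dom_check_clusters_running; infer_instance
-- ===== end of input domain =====

-- B replaces A's per-cluster filter-and-count loop by one filter of the non-Running pod names followed by a single prefix test over clusters (objective: simpler).


-- ===== PORT A =====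
-- Port of A: loop over clusters, filter pods by prefix, count Running, break on first mismatch.
def check_clusters_running_loop (pods : List (String × String)) : List String → Bool
  | [] => true
  | cluster :: rest =>
    let cluster_pods := pods.filter (fun p => PySem.Str.startswith p.1 cluster)
    let total_pods := cluster_pods.length
    let running_pods := (cluster_pods.filter (fun p => p.2 == "Running")).length
    if running_pods ≠ total_pods then false
    else check_clusters_running_loop pods rest

def check_clusters_running (pods : List (String × String)) (clusters : List String) : Bool :=
  check_clusters_running_loop pods clusters

-- ===== PORT B =====
-- Port of B: names of non-Running pods, then a single any over clusters × bad names.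
def check_clusters_running_alt (pods : List (String × String)) (clusters : List String) : Bool :=
  let bad := (pods.filter (fun p => !(p.2 == "Running"))).map Prod.fst
  !(clusters.any (fun cluster => bad.any (fun name => PySem.Str.startswith name cluster)))

-- ===== PRECONDITION & SPEC =====
def Spec_check_clusters_running (pods : List (String × String)) (clusters : List String) (out : Bool) : Prop := out = check_clusters_running_alt pods clusters
instance (pods : List (String × String)) (clusters : List String) (out : Bool) : Decidable (Spec_check_clusters_running pods clusters out) := by unfold Spec_check_clusters_running; infer_instance

-- ===== CLAIM (what is proved, stated in full; the proofs are below) =====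
def Claim_equal_check_clusters_running : Prop := ∀ (pods : List (String × String)) (clusters : List String), Dom_check_clusters_running pods clusters → Spec_check_clusters_running pods clusters (check_clusters_running pods clusters)

-- ===== LEMMAS AND PROOFS =====

-- ===== VERDICT (by name: the statement is the Claim_ definition above) =====


lemma pv_key (pods : List (String × String)) (c : String) :
    ((List.filter (fun a => a.2 == "Running" && PySem.Chars.startswith a.1.toList c.toList) pods).length =
      (List.filter (fun p => PySem.Chars.startswith p.1.toList c.toList) pods).length)
    ↔ (pods.any fun a => !(a.2 == "Running") && PySem.Chars.startswith a.1.toList c.toList) = false := by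
  induction pods with
  | nil => simp
  | cons p rest ih =>
    by_cases hs : PySem.Chars.startswith p.1.toList c.toList <;>
      by_cases hr : p.2 == "Running"
    · simp [hs, hr, ih]
    · have hle : (List.filter (fun a => a.2 == "Running" && PySem.Chars.startswith a.1.toList c.toList) rest).length
          ≤ (List.filter (fun p => PySem.Chars.startswith p.1.toList c.toList) rest).length := by
        rw [← List.filter_filter]; exact List.length_filter_le _ _
      simp [hs, hr]
      omega
    · simp [hs, hr, ih]
    · simp [hs, hr, ih]

lemma pv_loop (pods : List (String × String)) : ∀ clusters : List String,
    check_clusters_running_loop pods clusters =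
      !(clusters.any fun c => pods.any fun a => !(a.2 == "Running") && PySem.Chars.startswith a.1.toList c.toList)
  | [] => by simp [check_clusters_running_loop]
  | c :: rest => by
    simp only [check_clusters_running_loop, List.any_cons, Bool.not_or]
    by_cases h : ((List.filter (fun p => p.2 == "Running") (List.filter (fun p => PySem.Str.startswith p.1 c) pods)).length =
        (List.filter (fun p => PySem.Str.startswith p.1 c) pods).length)
    · rw [if_neg (by exact fun hne => hne h)]
      have hb : (pods.any fun a => !(a.2 == "Running") && PySem.Chars.startswith a.1.toList c.toList) = false := by
        apply (pv_key pods c).mp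
        simpa [List.filter_filter, PySem.Str.startswith] using h
      rw [pv_loop pods rest, hb]
      simp
    · rw [if_pos (by exact h)]
      have hb : ¬ ((pods.any fun a => !(a.2 == "Running") && PySem.Chars.startswith a.1.toList c.toList) = false) := by
        intro hf
        exact h (by simpa [List.filter_filter, PySem.Str.startswith] using (pv_key pods c).mpr hf)
      simp [Bool.not_eq_false] at hb
      simp [hb]

theorem check_clusters_running_spec : Claim_equal_check_clusters_running := by
  intro pods clusters _
  unfold Spec_check_clusters_running check_clusters_running check_clusters_running_alt
  rw [pv_loop]
  simp [PySem.Str.startswith]
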